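-- pv_equiv track=rewrite | github.com/shibam120302/GFG_POTD | Optimal Array.py | optimalArray
-- ===== SOURCE A (Python) =====
-- from typing import List
--
-- def optimalArray(n : int, a : List[int]) -> List[int]:
--     sum1=0
--     sum2=0
--     ans=[]
--     mid=(n+1)//2
--     for i in range(mid):
--         sum1+=a[i]
--         if 2*i<n:
--             sum2+=a[2*i]
--             diff=((i+1)*a[i])-sum1+((sum2-sum1)-i*a[i])
--             ans.append(diff)
--         if 2*i+1<n:
--             sum2+=a[2*i+1]
--             diff=((i+1)*a[i])-sum1+((sum2-sum1)-(i+1)*a[i])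
--             ans.append(diff)
--     return ans
-- ===== SOURCE B (Python) =====
-- from typing import List
--
-- def optimalArray(n: int, a: List[int]) -> List[int]:
--     P = [0]
--     for k in range(n):
--         P.append(P[-1] + a[k])
--     return [P[m] - P[(m + 1) // 2] - P[m // 2] for m in range(1, n + 1)]
-- ===== Notes on version B (the rewrite author's own statement) =====
-- stated objective: simpler
-- what changed: B replaces A's single interleaved loop that maintains two running sums with an odd/even branch pair by first building a prefix-sum table P and then emitting each answer with the closed-form index expression P[m] - P[(m+1)//2] - P[m//2].
import Mathlib
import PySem

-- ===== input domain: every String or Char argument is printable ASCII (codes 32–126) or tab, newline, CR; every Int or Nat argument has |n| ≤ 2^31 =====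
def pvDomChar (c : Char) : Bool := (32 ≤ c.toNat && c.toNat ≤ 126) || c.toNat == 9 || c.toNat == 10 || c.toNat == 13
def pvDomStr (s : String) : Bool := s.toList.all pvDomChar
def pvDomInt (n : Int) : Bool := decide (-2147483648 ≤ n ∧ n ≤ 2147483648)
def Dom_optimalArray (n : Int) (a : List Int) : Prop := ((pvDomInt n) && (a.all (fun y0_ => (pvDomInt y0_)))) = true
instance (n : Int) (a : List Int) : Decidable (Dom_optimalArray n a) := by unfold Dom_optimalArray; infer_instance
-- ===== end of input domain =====

-- B replaces A's interleaved two-accumulator loop (with an odd/even branch) by a prefix-sum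
-- table plus one closed-form indexing pass: simpler, same O(n) cost.

-- ===== PORT A =====
def optimalArray (n : Int) (a : List Int) : List Int :=
  -- sum1=0; sum2=0; ans=[]; mid=(n+1)//2
  let mid := PySem.Int.floordiv (n + 1) 2
  -- for i in range(mid): …
  let st :=
    (PySem.List.pyRange 0 mid 1).foldl
      (fun (st : Int × Int × List Int) (i : Int) =>
        match st with
        | (sum1, sum2, ans) =>
          let sum1 := sum1 + PySem.List.pyGetD a i 0
          let (sum2, ans) :=
            if 2 * i < n then
              let sum2 := sum2 + PySem.List.pyGetD a (2 * i) 0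
              let diff := ((i + 1) * PySem.List.pyGetD a i 0) - sum1 +
                ((sum2 - sum1) - i * PySem.List.pyGetD a i 0)
              (sum2, ans ++ [diff])
            else (sum2, ans)
          let (sum2, ans) :=
            if 2 * i + 1 < n then
              let sum2 := sum2 + PySem.List.pyGetD a (2 * i + 1) 0
              let diff := ((i + 1) * PySem.List.pyGetD a i 0) - sum1 +
                ((sum2 - sum1) - (i + 1) * PySem.List.pyGetD a i 0)
              (sum2, ans ++ [diff])
            else (sum2, ans)
          (sum1, sum2, ans))
      (0, 0, [])
  st.2.2

-- ===== PORT B =====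
def optimalArray_alt (n : Int) (a : List Int) : List Int :=
  -- P = [0]; for k in range(n): P.append(P[-1] + a[k])
  let P :=
    (PySem.List.pyRange 0 n 1).foldl
      (fun (P : List Int) (k : Int) =>
        P ++ [PySem.List.pyGetD P (-1) 0 + PySem.List.pyGetD a k 0])
      [0]
  -- [P[m] - P[(m+1)//2] - P[m//2] for m in range(1, n+1)]
  (PySem.List.pyRange 1 (n + 1) 1).map
    (fun m =>
      PySem.List.pyGetD P m 0 - PySem.List.pyGetD P (PySem.Int.floordiv (m + 1) 2) 0 -
        PySem.List.pyGetD P (PySem.Int.floordiv m 2) 0)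

-- ===== PRECONDITION & SPEC =====
-- Pre_ excludes exactly the inputs with n > len(a), where Python A (and B) raise IndexError.
def Pre_optimalArray (n : Int) (a : List Int) : Prop := n ≤ (a.length : Int)
instance (n : Int) (a : List Int) : Decidable (Pre_optimalArray n a) := by
  unfold Pre_optimalArray; infer_instance
def pvWitness_optimalArray : Int × List Int := (2, [1, 5])

def Spec_optimalArray (n : Int) (a : List Int) (out : List Int) : Prop := out = optimalArray_alt n a
instance (n : Int) (a : List Int) (out : List Int) : Decidable (Spec_optimalArray n a out) := by
  unfold Spec_optimalArray; infer_instance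

-- ===== CLAIM (what is proved, stated in full; the proofs are below) =====
def Claim_equal_optimalArray : Prop := ∀ (n : Int) (a : List Int), Dom_optimalArray n a → Pre_optimalArray n a → Spec_optimalArray n a (optimalArray n a)

-- ===== LEMMAS AND PROOFS =====

-- prefix sum of the first k elements
def pS (a : List Int) (k : Nat) : Int := (a.take k).sum
-- the value both programs place at position m-1 (1 ≤ m)
def pF (a : List Int) (m : Nat) : Int := pS a m - pS a ((m + 1) / 2) - pS a (m / 2)

theorem pS_succ (a : List Int) (j : Nat) (h : j < a.length) :
    pS a (j + 1) = pS a j + a.getD j 0 := by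
  simp [pS, List.sum_take_succ _ _ (by omega), List.getD, List.getElem?_eq_getElem h]

theorem pF_odd (a : List Int) (j : Nat) :
    pF a (2 * j + 1) = pS a (2 * j + 1) - pS a (j + 1) - pS a j := by
  have h1 : (2 * j + 1 + 1) / 2 = j + 1 := by omega
  have h2 : (2 * j + 1) / 2 = j := by omega
  rw [pF, h1, h2]

theorem pF_even (a : List Int) (j : Nat) :
    pF a (2 * j + 2) = pS a (2 * j + 2) - pS a (j + 1) - pS a (j + 1) := by
  have h1 : (2 * j + 2 + 1) / 2 = j + 1 := by omega
  have h2 : (2 * j + 2) / 2 = j + 1 := by omega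
  rw [pF, h1, h2]

theorem loopA_inv (n : Int) (a : List Int) (hn : 0 < n) (hlen : n ≤ (a.length : Int)) :
    ∀ j : Nat, (j : Int) ≤ PySem.Int.floordiv (n + 1) 2 →
      (PySem.List.pyRange 0 (j : Int) 1).foldl
        (fun (st : Int × Int × List Int) (i : Int) =>
          match st with
          | (sum1, sum2, ans) =>
            let sum1 := sum1 + PySem.List.pyGetD a i 0
            let (sum2, ans) :=
              if 2 * i < n then
                let sum2 := sum2 + PySem.List.pyGetD a (2 * i) 0
                let diff := ((i + 1) * PySem.List.pyGetD a i 0) - sum1 +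
                  ((sum2 - sum1) - i * PySem.List.pyGetD a i 0)
                (sum2, ans ++ [diff])
              else (sum2, ans)
            let (sum2, ans) :=
              if 2 * i + 1 < n then
                let sum2 := sum2 + PySem.List.pyGetD a (2 * i + 1) 0
                let diff := ((i + 1) * PySem.List.pyGetD a i 0) - sum1 +
                  ((sum2 - sum1) - (i + 1) * PySem.List.pyGetD a i 0)
                (sum2, ans ++ [diff])
              else (sum2, ans)
            (sum1, sum2, ans))
        (0, 0, []) =
      (pS a j, pS a (min n.toNat (2 * j)),
        (List.range (min n.toNat (2 * j))).map (fun k => pF a (k + 1))) := by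
  intro j
  induction j with
  | zero =>
    intro _
    simp [PySem.List.pyRange_one_eq_nil (le_refl (0 : Int)), pS]
  | succ j ih =>
    intro hj1
    have hj1' : ((j : Int) + 1) ≤ PySem.Int.floordiv (n + 1) 2 := by push_cast at hj1; omega
    have h2j1 : 2 * (j : Int) + 1 ≤ n := by
      have := (PySem.Int.le_floordiv_iff_mul_le (by norm_num : (0:Int) < 2)).mp hj1'
      omega
    have hjm : (j : Int) ≤ PySem.Int.floordiv (n + 1) 2 := by omega
    have hlen' : n ≤ (a.length : Int) := hlen
    have hjl : j < a.length := by omega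
    have h2jl : 2 * j < a.length := by omega
    have e2 : 2 * (j : Int) = ((2 * j : Nat) : Int) := by push_cast; ring
    have e3 : 2 * (j : Int) + 1 = ((2 * j + 1 : Nat) : Int) := by push_cast; ring
    have hmin : min n.toNat (2 * j) = 2 * j := by omega
    rw [show ((j + 1 : Nat) : Int) = (j : Int) + 1 from by push_cast; ring,
      PySem.List.pyRange_one_succ_right (by positivity), List.foldl_append, ih hjm,
      List.foldl_cons, List.foldl_nil]
    dsimp only
    rw [if_pos (by omega : 2 * (j : Int) < n), e2]
    simp only [PySem.List.pyGetD_natCast, hmin]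
    by_cases hb2 : ((2 * j : Nat) : Int) + 1 < n
    · rw [if_pos hb2, show ((2 * j : Nat) : Int) + 1 = ((2 * j + 1 : Nat) : Int) from by push_cast; ring]
      simp only [PySem.List.pyGetD_natCast]
      have h2jl1 : 2 * j + 1 < a.length := by omega
      have hminS : min n.toNat (2 * (j + 1)) = 2 * j + 2 := by omega
      simp only [Prod.mk.injEq, hminS]
      refine ⟨?_, ?_, ?_⟩
      · rw [pS_succ a j hjl]
      · rw [pS_succ a (2 * j + 1) h2jl1, pS_succ a (2 * j) h2jl]
      · rw [show 2 * j + 2 = (2 * j + 1) + 1 from rfl, List.range_succ, List.range_succ,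
          List.map_append, List.map_append, List.map_cons, List.map_nil, List.map_cons,
          List.map_nil]
        congr 1
        · congr 1
          simp only [List.cons.injEq, and_true]
          rw [pF_odd, pS_succ a (2 * j) h2jl, pS_succ a j hjl]; ring
        · simp only [List.cons.injEq, and_true]
          rw [pF_even, pS_succ a (2 * j + 1) h2jl1, pS_succ a (2 * j) h2jl, pS_succ a j hjl]; ring
    · rw [if_neg hb2]
      have hminS : min n.toNat (2 * (j + 1)) = 2 * j + 1 := by omega
      simp only [Prod.mk.injEq, hminS]
      refine ⟨?_, ?_, ?_⟩
      · rw [pS_succ a j hjl]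
      · rw [pS_succ a (2 * j) h2jl]
      · rw [List.range_succ, List.map_append, List.map_cons, List.map_nil]
        congr 1
        simp only [List.cons.injEq, and_true]
        rw [pF_odd, pS_succ a (2 * j) h2jl, pS_succ a j hjl]; ring

theorem loopB_inv (n : Int) (a : List Int) (hlen : n ≤ (a.length : Int)) :
    ∀ m : Nat, (m : Int) ≤ n →
      (PySem.List.pyRange 0 (m : Int) 1).foldl
        (fun (P : List Int) (k : Int) =>
          P ++ [PySem.List.pyGetD P (-1) 0 + PySem.List.pyGetD a k 0])
        [0] =
      (List.range (m + 1)).map (pS a) := by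
  intro m
  induction m with
  | zero =>
    intro _
    simp [PySem.List.pyRange_one_eq_nil (by omega : (0:Int) ≤ 0), pS]
  | succ m ih =>
    intro hm
    have hm' : (m : Int) ≤ n := by push_cast at hm ⊢; omega
    have hcast : ((m + 1 : Nat) : Int) = (m : Int) + 1 := by push_cast; ring
    rw [hcast, PySem.List.pyRange_one_succ_right (by positivity), List.foldl_append, ih hm']
    have hsplit : (List.range (m + 1)).map (pS a) = (List.range m).map (pS a) ++ [pS a m] := by
      rw [List.range_succ, List.map_append, List.map_cons, List.map_nil]
    have hml : m < a.length := by omega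
    rw [List.foldl_cons, List.foldl_nil, hsplit, PySem.List.pyGetD_neg_one_append_singleton,
      PySem.List.pyGetD_natCast, List.range_succ, List.range_succ, List.map_append,
      List.map_append, List.map_cons, List.map_nil, List.map_cons, List.map_nil,
      pS_succ a m hml, List.append_assoc]

-- ===== VERDICT (by name: the statement is the Claim_ definition above) =====
theorem castFold (n : Int) (a : List Int) (hn : 0 < n) (hpre : n ≤ (a.length : Int)) :
    optimalArray n a = (List.range n.toNat).map (fun k => pF a (k + 1)) := by
  have hmid1 : (1 : Int) ≤ PySem.Int.floordiv (n + 1) 2 :=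
    (PySem.Int.le_floordiv_iff_mul_le (by norm_num)).mpr (by omega)
  have hmodlt := PySem.Int.mod_lt (n + 1) (by norm_num : (0:Int) < 2)
  have hmodge := PySem.Int.mod_nonneg (n + 1) (by norm_num : (0:Int) < 2)
  have hdm := PySem.Int.floordiv_mul_add_mod (n + 1) 2
  have hmidnat : (((PySem.Int.floordiv (n + 1) 2).toNat : Nat) : Int) =
      PySem.Int.floordiv (n + 1) 2 := by omega
  have hA := loopA_inv n a hn hpre (PySem.Int.floordiv (n + 1) 2).toNat (by omega)
  rw [hmidnat] at hA
  have hmin : min n.toNat (2 * (PySem.Int.floordiv (n + 1) 2).toNat) = n.toNat := by omega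
  rw [hmin] at hA
  dsimp only [optimalArray]
  rw [hA]

theorem castFoldB (n : Int) (a : List Int) (hn : 0 < n) (hpre : n ≤ (a.length : Int)) :
    optimalArray_alt n a = (List.range n.toNat).map (fun k => pF a (k + 1)) := by
  have hncast : ((n.toNat : Nat) : Int) = n := by omega
  have hB := loopB_inv n a hpre n.toNat (by omega)
  dsimp only [optimalArray_alt]
  rw [← hncast, hB, PySem.List.pyRange_one 1 ((n.toNat : Int) + 1),
    show (((n.toNat : Int) + 1 - 1)).toNat = n.toNat from by omega, List.map_map]
  refine (List.map_congr_left ?_).symm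
  intro k hk
  have hk' : k < n.toNat := List.mem_range.mp hk
  dsimp only [Function.comp]
  rw [show (1 : Int) + (k : Int) = ((k + 1 : Nat) : Int) from by push_cast; ring]
  rw [show ((k + 1 : Nat) : Int) + 1 = ((k + 2 : Nat) : Int) from by push_cast; ring]
  rw [show PySem.Int.floordiv ((k + 2 : Nat) : Int) 2 = (((k + 2) / 2 : Nat) : Int) from by
      exact_mod_cast PySem.Int.floordiv_natCast (k + 2) 2]
  rw [show PySem.Int.floordiv ((k + 1 : Nat) : Int) 2 = (((k + 1) / 2 : Nat) : Int) from by
      exact_mod_cast PySem.Int.floordiv_natCast (k + 1) 2]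
  rw [PySem.List.pyGetD_natCast, PySem.List.pyGetD_natCast, PySem.List.pyGetD_natCast]
  rw [PySem.List.getD_map_range _ _ _ _ (by omega), PySem.List.getD_map_range _ _ _ _ (by omega),
    PySem.List.getD_map_range _ _ _ _ (by omega)]
  rw [pF]

theorem optimalArray_spec : Claim_equal_optimalArray := by
  intro n a _ hpre
  unfold Spec_optimalArray
  by_cases hn : 0 < n
  · rw [castFold n a hn hpre, castFoldB n a hn hpre]
  · have hmid0 : PySem.Int.floordiv (n + 1) 2 < 1 :=
      (PySem.Int.floordiv_lt_iff_lt_mul (by norm_num)).mpr (by omega)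
    dsimp only [optimalArray, optimalArray_alt]
    rw [PySem.List.pyRange_one_eq_nil (by omega : PySem.Int.floordiv (n + 1) 2 ≤ 0),
      PySem.List.pyRange_one_eq_nil (by omega : n + 1 ≤ 1)]
    simp
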